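-- pv_equiv track=rewrite | github.com/ZaberKo/MeGA | utils.py | path_idx2name
-- ===== SOURCE A (Python) =====
-- def choice_idx2name(choice_idx):
--     if choice_idx == 0:
--         choice = '3x3_e3'
--     elif choice_idx == 1:
--         choice = '3x3_e3_se'
--     elif choice_idx == 2:
--         choice = '5x5_e3'
--     elif choice_idx == 3:
--         choice = '5x5_e3_se'
--     elif choice_idx == 4:
--         choice = '7x7_e3'
--     elif choice_idx == 5:
--         choice = '7x7_e3_se'
--     elif choice_idx == 6:
--         choice = '3x3_e6'
--     elif choice_idx == 7:
--         choice = '3x3_e6_se'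
--     elif choice_idx == 8:
--         choice = '5x5_e6'
--     elif choice_idx == 9:
--         choice = '5x5_e6_se'
--     elif choice_idx == 10:
--         choice = '7x7_e6'
--     elif choice_idx == 11:
--         choice = '7x7_e6_se'
--     elif choice_idx==12:
--         choice='skip'
--     else:
--         raise ValueError('incorrect choice idx, must between 0 and 12')
--     return choice
--
-- def path_idx2name(paths):
--     new_paths = []
--     for path in paths:
--         new_path = []
--         for choice in path:
--             new_path.append(choice_idx2name(choice))
--         new_paths.append(new_path)
--
--     return new_paths
-- ===== SOURCE B (Python) =====
-- def choice_idx2name(i):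
--     if i == 12:
--         return 'skip'
--     if i in range(12):
--         k = (3, 5, 7)[(i % 6) // 2]
--         e = 3 if i < 6 else 6
--         return f'{k}x{k}_e{e}' + ('_se' if i % 2 == 1 else '')
--     raise ValueError('incorrect choice idx, must between 0 and 12')
--
-- def path_idx2name(paths):
--     return [[choice_idx2name(c) for c in path] for path in paths]
-- ===== Notes on version B (the rewrite author's own statement) =====
-- stated objective: idiomatic
-- what changed: Replaces the 13-branch if/elif lookup table with a closed-form arithmetic construction of the name (kernel = (3,5,7)[(i%6)//2], expansion = 3 or 6, optional '_se' suffix) and the nested append loops with nested list comprehensions.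
import Mathlib
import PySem

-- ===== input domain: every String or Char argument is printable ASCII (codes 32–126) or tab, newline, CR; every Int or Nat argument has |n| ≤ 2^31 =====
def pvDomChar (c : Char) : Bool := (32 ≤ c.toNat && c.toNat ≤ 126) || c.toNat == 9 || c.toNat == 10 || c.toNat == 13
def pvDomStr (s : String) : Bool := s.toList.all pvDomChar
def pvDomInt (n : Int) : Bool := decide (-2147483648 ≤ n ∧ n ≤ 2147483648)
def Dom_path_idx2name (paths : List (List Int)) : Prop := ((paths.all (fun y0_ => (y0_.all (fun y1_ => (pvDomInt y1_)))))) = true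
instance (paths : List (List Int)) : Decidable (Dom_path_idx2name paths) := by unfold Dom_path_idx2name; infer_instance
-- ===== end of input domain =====

-- B replaces A's 13-branch name table by a closed-form arithmetic construction and the
-- nested append loops by nested comprehensions (maps); equivalence of the RETURN value is proved
-- on inputs where A does not raise (all indices in 0..12).

-- ===== PORT A =====
-- the else branch raises ValueError in Python; excluded by Pre_, "" is a totality guard only
def choiceA (c : Int) : String :=
  if c = 0 then "3x3_e3"
  else if c = 1 then "3x3_e3_se"
  else if c = 2 then "5x5_e3"
  else if c = 3 then "5x5_e3_se"
  else if c = 4 then "7x7_e3"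
  else if c = 5 then "7x7_e3_se"
  else if c = 6 then "3x3_e6"
  else if c = 7 then "3x3_e6_se"
  else if c = 8 then "5x5_e6"
  else if c = 9 then "5x5_e6_se"
  else if c = 10 then "7x7_e6"
  else if c = 11 then "7x7_e6_se"
  else if c = 12 then "skip"
  else ""

def path_idx2name (paths : List (List Int)) : List (List String) :=
  paths.foldl (fun new_paths path =>
    new_paths ++ [path.foldl (fun new_path choice => new_path ++ [choiceA choice]) []]) []

-- ===== PORT B =====
-- the final raise in Python; excluded by Pre_, "" is a totality guard only
def choiceB (i : Int) : String :=
  if i = 12 then "skip"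
  else if 0 ≤ i ∧ i < 12 then
    let k := [(3 : Int), 5, 7].getD (PySem.Int.floordiv (PySem.Int.mod i 6) 2).toNat 0
    let e : Int := if i < 6 then 3 else 6
    PySem.Int.toStr k ++ "x" ++ PySem.Int.toStr k ++ "_e" ++ PySem.Int.toStr e ++
      (if PySem.Int.mod i 2 = 1 then "_se" else "")
  else ""

def path_idx2name_alt (paths : List (List Int)) : List (List String) :=
  paths.map (fun path => path.map choiceB)

-- ===== PRECONDITION & SPEC =====
-- A raises ValueError on any index outside 0..12; exactly those inputs are excluded.
def Pre_path_idx2name (paths : List (List Int)) : Prop :=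
  ∀ path ∈ paths, ∀ c ∈ path, 0 ≤ c ∧ c ≤ 12
instance (paths : List (List Int)) : Decidable (Pre_path_idx2name paths) := by
  unfold Pre_path_idx2name; infer_instance
def pvWitness_path_idx2name : List (List Int) := [[0, 5, 12], [7]]

def Spec_path_idx2name (paths : List (List Int)) (out : List (List String)) : Prop := out = path_idx2name_alt paths
instance (paths : List (List Int)) (out : List (List String)) : Decidable (Spec_path_idx2name paths out) := by unfold Spec_path_idx2name; infer_instance

-- ===== CLAIM (what is proved, stated in full; the proofs are below) =====
def Claim_equal_path_idx2name : Prop := ∀ (paths : List (List Int)), Dom_path_idx2name paths → Pre_path_idx2name paths → Spec_path_idx2name paths (path_idx2name paths)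

-- ===== LEMMAS AND PROOFS =====

theorem choice_eq (c : Int) (h0 : 0 ≤ c) (h1 : c ≤ 12) : choiceA c = choiceB c := by
  interval_cases c <;> decide

theorem foldl_append_map {α β : Type} (f : α → β) (l : List α) (acc : List β) :
    l.foldl (fun a x => a ++ [f x]) acc = acc ++ l.map f := by
  induction l generalizing acc with
  | nil => simp
  | cons x xs ih => simp [ih]

-- ===== VERDICT (by name: the statement is the Claim_ definition above) =====
theorem path_idx2name_spec : Claim_equal_path_idx2name := by
  intro paths _ hpre
  unfold Spec_path_idx2name path_idx2name path_idx2name_alt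
  rw [foldl_append_map (fun path => path.foldl (fun a x => a ++ [choiceA x]) []) paths []]
  simp only [List.nil_append]
  apply List.map_congr_left
  intro path hpath
  rw [foldl_append_map choiceA path []]
  simp only [List.nil_append]
  apply List.map_congr_left
  intro c hc
  exact choice_eq c (hpre path hpath c hc).1 (hpre path hpath c hc).2
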